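-- pv_equiv track=rewrite | github.com/dmnth/hackerrank | algos/easy/jumping_on_the_clouds/solution.py | cloudCounter
-- ===== SOURCE A (Python) =====
-- def cloudCounter(clouds, jump_size):
--
-- 	energy_level = 100
-- 	idx = 0
-- 	n = len(clouds)
--
-- 	while True:
--
-- 		idx = (idx + jump_size) % n
--
-- 		if clouds[idx] == 1:
-- 			energy_level -= 3
-- 		else:
-- 			energy_level -= 1
--
-- 		if idx == 0:
-- 			break
--
-- 	return energy_level
-- ===== SOURCE B (Python) =====
-- def cloudCounter(clouds, jump_size):
--     # Closed form: the walk visits indices (k*jump_size) % n for k = 1..m,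
--     # where m = n // gcd(|jump_size|, n) is the order of jump_size mod n.
--     n = len(clouds)
--     a, b = abs(jump_size), n
--     while b:
--         a, b = b, a % b
--     m = n // a
--     ones = sum(1 for k in range(1, m + 1) if clouds[(k * jump_size) % n] == 1)
--     return 100 - 3 * ones - (m - ones)
-- ===== Notes on version B (the rewrite author's own statement) =====
-- stated objective: alternative
-- what changed: Replaces A's step-by-step return-to-zero simulation with a closed form: the walk makes exactly m = n // gcd(|jump_size|, n) jumps, so B computes m via Euclid's algorithm and counts the thunderclouds among the m landing indices (k*jump_size) % n directly.
import Mathlib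
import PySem

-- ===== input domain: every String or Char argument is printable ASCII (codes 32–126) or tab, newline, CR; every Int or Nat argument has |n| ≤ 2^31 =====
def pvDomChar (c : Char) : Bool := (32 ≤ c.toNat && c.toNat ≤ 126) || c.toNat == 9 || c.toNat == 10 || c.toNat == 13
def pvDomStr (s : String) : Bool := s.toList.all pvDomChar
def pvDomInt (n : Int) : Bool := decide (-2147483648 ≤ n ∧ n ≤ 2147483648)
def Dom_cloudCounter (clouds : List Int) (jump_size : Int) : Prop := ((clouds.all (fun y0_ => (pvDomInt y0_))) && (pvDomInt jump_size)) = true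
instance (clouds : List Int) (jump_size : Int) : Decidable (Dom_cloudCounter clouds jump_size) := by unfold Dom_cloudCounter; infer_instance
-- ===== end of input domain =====

-- B replaces A's return-to-zero simulation by a gcd closed form for the number of visited
-- clouds plus a counting pass (objective: alternative; equal return values on nonempty input).

-- ===== PORT A =====
-- while True: idx = (idx+jump_size) % n; pay 3 or 1; break when idx == 0.  Fuel = n makes
-- the recursion total; it suffices because the loop runs exactly n / gcd(|jump_size|, n) ≤ n
-- iterations (proved below), so the fuel-0 branch is never reached on nonempty clouds.
def loopA (clouds : List Int) (n j : Int) : Nat → Int → Int → Int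
  | 0, _, e => e
  | f+1, idx, e =>
    let idx' := PySem.Int.mod (idx + j) n
    let e' := if (PySem.List.pyGet? clouds idx').getD 0 == 1 then e - 3 else e - 1
    if idx' = 0 then e' else loopA clouds n j f idx' e'

def cloudCounter (clouds : List Int) (jump_size : Int) : Int :=
  loopA clouds (clouds.length : Int) jump_size clouds.length 0 100

-- ===== PORT B =====
-- hand-written Euclid loop of Source B (fuel n+1 suffices: the second argument strictly decreases)
def gcdLoop : Nat → Int → Int → Int
  | 0, a, _ => a
  | f+1, a, b => if b = 0 then a else gcdLoop f b (PySem.Int.mod a b)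

def cloudCounter_alt (clouds : List Int) (jump_size : Int) : Int :=
  let n : Int := clouds.length
  let g := gcdLoop (clouds.length + 1) (jump_size.natAbs : Int) n
  let m := PySem.Int.floordiv n g
  let ones : Int :=
    ((PySem.List.pyRange 1 (m+1) 1).filter
      (fun k => (PySem.List.pyGet? clouds (PySem.Int.mod (k * jump_size) n)).getD 0 == 1)).length
  100 - 3 * ones - (m - ones)

-- ===== PRECONDITION & SPEC =====
-- Pre_ excludes exactly the empty cloud list, on which A raises ZeroDivisionError.
def Pre_cloudCounter (clouds : List Int) (jump_size : Int) : Prop := clouds ≠ []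
instance (clouds : List Int) (jump_size : Int) : Decidable (Pre_cloudCounter clouds jump_size) := by unfold Pre_cloudCounter; infer_instance

def pvWitness_cloudCounter : List Int × Int := ([0, 1, 1], 2)

def Spec_cloudCounter (clouds : List Int) (jump_size : Int) (out : Int) : Prop := out = cloudCounter_alt clouds jump_size
instance (clouds : List Int) (jump_size : Int) (out : Int) : Decidable (Spec_cloudCounter clouds jump_size out) := by unfold Spec_cloudCounter; infer_instance

-- ===== CLAIM (what is proved, stated in full; the proofs are below) =====
def Claim_equal_cloudCounter : Prop := ∀ (clouds : List Int) (jump_size : Int), Dom_cloudCounter clouds jump_size → Pre_cloudCounter clouds jump_size → Spec_cloudCounter clouds jump_size (cloudCounter clouds jump_size)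

-- ===== LEMMAS AND PROOFS =====

-- energy paid for the k-th jump, which lands on index (k*j) mod n
def costK (clouds : List Int) (j : Int) (k : Int) : Int :=
  if (PySem.List.pyGet? clouds (PySem.Int.mod (k * j) (clouds.length : Int))).getD 0 == 1 then 3 else 1

lemma gcdLoop_eq : ∀ (f a b : Nat), b < f → gcdLoop f (a : Int) (b : Int) = (Nat.gcd a b : Int) := by
  intro f
  induction f with
  | zero => intro a b h; omega
  | succ f ih =>
    intro a b h
    by_cases hb : b = 0
    · subst hb; simp [gcdLoop]
    · have hb' : (b : Int) ≠ 0 := by exact_mod_cast hb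
      have hlt : a % b < f := lt_of_lt_of_le (Nat.mod_lt a (by omega)) (by omega)
      rw [gcdLoop, if_neg hb', PySem.Int.mod_natCast, ih b (a % b) hlt]
      rw [Nat.gcd_comm b (a % b), ← Nat.gcd_rec b a, Nat.gcd_comm]

-- n | k*a  iff  the order n/gcd(a,n) divides k
lemma nat_core (n a k : Nat) (hn : 0 < n) : n ∣ k * a ↔ (n / Nat.gcd a n) ∣ k := by
  set g := Nat.gcd a n with hg
  have hg0 : 0 < g := Nat.gcd_pos_of_pos_right a hn
  have hcop : Nat.Coprime (a / g) (n / g) := Nat.coprime_div_gcd_div_gcd hg0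
  have hn' : g * (n / g) = n := Nat.mul_div_cancel' (Nat.gcd_dvd_right a n)
  have ha' : g * (a / g) = a := Nat.mul_div_cancel' (Nat.gcd_dvd_left a n)
  have key : k * a = g * (k * (a / g)) := by rw [mul_left_comm, ha']
  constructor
  · intro h
    have h3 : n / g ∣ k * (a / g) := by
      refine (Nat.mul_dvd_mul_iff_left hg0).mp ?_
      rw [hn', ← key]; exact h
    exact hcop.symm.dvd_of_dvd_mul_right h3
  · intro h
    have h2 : g * (n / g) ∣ g * (k * (a / g)) :=
      Nat.mul_dvd_mul_left g (h.mul_right (a / g))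
    rw [hn', ← key] at h2; exact h2

-- the walk is back at cloud 0 after k jumps iff n/gcd(|j|,n) divides k
lemma period_iff (clouds : List Int) (j : Int) (hn : clouds ≠ []) (k : Nat) :
    PySem.Int.mod ((k : Int) * j) (clouds.length : Int) = 0 ↔
      (clouds.length / Nat.gcd j.natAbs clouds.length) ∣ k := by
  have hn0 : 0 < clouds.length := List.length_pos_of_ne_nil hn
  rw [PySem.Int.mod_eq_zero_iff_dvd, Int.ofNat_dvd_left, Int.natAbs_mul, Int.natAbs_natCast]
  exact nat_core clouds.length j.natAbs k hn0

-- B's closed form 100 - 3*ones - (m - ones) as 100 minus a sum of per-jump costs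
lemma sum_costK (clouds : List Int) (j : Int) (l : List Int) :
    (l.map (costK clouds j)).sum =
      2 * ((l.filter (fun k => (PySem.List.pyGet? clouds (PySem.Int.mod (k * j) (clouds.length : Int))).getD 0 == 1)).length : Int) + l.length := by
  induction l with
  | nil => simp
  | cons x xs ih =>
    simp only [List.map_cons, List.sum_cons, List.filter_cons, List.length_cons, ih, costK]
    split_ifs with hx
    · simp; ring
    · simp; ring

lemma idx_step (clouds : List Int) (j : Int) (hn : clouds ≠ []) (t : Nat) :
    PySem.Int.mod (PySem.Int.mod ((t : Int) * j) (clouds.length : Int) + j) (clouds.length : Int)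
      = PySem.Int.mod (((t : Int) + 1) * j) (clouds.length : Int) := by
  have hn0 : (0:Int) < clouds.length := by
    exact_mod_cast List.length_pos_of_ne_nil hn
  simp only [PySem.Int.mod_eq_emod_of_pos hn0, Int.emod_add_emod]
  ring_nf

-- A's loop, entered after t jumps with d = m - t jumps still to make, pays exactly
-- the costs of jumps t+1 .. m
lemma loopA_run (clouds : List Int) (j : Int) (hn : clouds ≠ []) :
    ∀ (d t f : Nat) (e : Int),
      t + d = clouds.length / Nat.gcd j.natAbs clouds.length → 0 < d → d ≤ f →
      loopA clouds (clouds.length : Int) j f (PySem.Int.mod ((t : Int) * j) (clouds.length : Int)) e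
        = e - ((PySem.List.pyRange ((t : Int) + 1) ((clouds.length / Nat.gcd j.natAbs clouds.length : Nat) + 1) 1).map (costK clouds j)).sum := by
  intro d
  induction d with
  | zero => omega
  | succ d ih =>
    intro t f e hm hd hf
    set m := clouds.length / Nat.gcd j.natAbs clouds.length with hmdef
    obtain ⟨f', rfl⟩ : ∃ f', f = f' + 1 := ⟨f - 1, by omega⟩
    simp only [loopA]
    rw [idx_step clouds j hn t]
    have hstep : (if (PySem.List.pyGet? clouds (PySem.Int.mod (((t:Int)+1) * j) (clouds.length:Int))).getD 0 == 1 then e - 3 else e - 1)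
        = e - costK clouds j ((t:Int)+1) := by
      unfold costK; split_ifs <;> ring
    by_cases hlast : d = 0
    · subst hlast
      have ht1 : t + 1 = m := by omega
      have hzero : PySem.Int.mod (((t:Int)+1) * j) (clouds.length:Int) = 0 := by
        exact (period_iff clouds j hn (t+1)).mpr (ht1 ▸ dvd_refl m)
      rw [hzero] at hstep ⊢
      rw [if_pos rfl, hstep]
      have : PySem.List.pyRange ((t:Int)+1) ((m:Int)+1) 1 = [(t:Int)+1] := by
        have h2 : ((m:Int)+1) = ((t:Int)+1) + 1 := by omega
        rw [h2, PySem.List.pyRange_one_singleton]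
      rw [this]
      simp
    · have hnz : PySem.Int.mod (((t:Int)+1) * j) (clouds.length:Int) ≠ 0 := by
        intro h0
        have hdvd : m ∣ (t+1) := by
          apply (period_iff clouds j hn (t+1)).mp
          exact h0
        have := Nat.le_of_dvd (by omega) hdvd
        omega
      rw [if_neg hnz, hstep]
      have hrec := ih (t+1) f' (e - costK clouds j ((t:Int)+1)) (by omega) (by omega) (by omega)
      have hcast : ((t+1 : Nat) : Int) = (t:Int)+1 := by push_cast; ring
      rw [hcast] at hrec
      rw [hrec]
      have hsplit : PySem.List.pyRange ((t:Int)+1) ((m:Int)+1) 1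
          = ((t:Int)+1) :: PySem.List.pyRange ((t:Int)+1+1) ((m:Int)+1) 1 := by
        apply PySem.List.pyRange_one_cons
        omega
      rw [hsplit]
      simp only [List.map_cons, List.sum_cons]
      ring

-- ===== VERDICT (by name: the statement is the Claim_ definition above) =====
theorem cloudCounter_spec : Claim_equal_cloudCounter := by
  intro clouds j _ hpre
  unfold Spec_cloudCounter
  have hn0 : 0 < clouds.length := List.length_pos_of_ne_nil hpre
  have hg0 : 0 < Nat.gcd j.natAbs clouds.length := Nat.gcd_pos_of_pos_right _ hn0
  have hm0 : 0 < clouds.length / Nat.gcd j.natAbs clouds.length :=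
    Nat.div_pos (Nat.le_of_dvd hn0 (Nat.gcd_dvd_right _ _)) hg0
  have hmn : clouds.length / Nat.gcd j.natAbs clouds.length ≤ clouds.length := Nat.div_le_self _ _
  -- A side
  have hA : cloudCounter clouds j
      = 100 - ((PySem.List.pyRange 1 (((clouds.length / Nat.gcd j.natAbs clouds.length : Nat) : Int) + 1) 1).map (costK clouds j)).sum := by
    have h0 : (0:Int) = PySem.Int.mod (((0:Nat):Int) * j) (clouds.length:Int) := by
      have hp : (0:Int) < clouds.length := by exact_mod_cast hn0
      simp [PySem.Int.mod_eq_emod_of_pos hp]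
    unfold cloudCounter
    rw [h0, loopA_run clouds j hpre (clouds.length / Nat.gcd j.natAbs clouds.length) 0
          clouds.length 100 (by omega) hm0 hmn]
    norm_num
  -- B side
  have hgl : gcdLoop (clouds.length + 1) (j.natAbs : Int) (clouds.length : Int)
      = ((Nat.gcd j.natAbs clouds.length : Nat) : Int) :=
    gcdLoop_eq (clouds.length + 1) j.natAbs clouds.length (by omega)
  have hB : cloudCounter_alt clouds j
      = 100 - ((PySem.List.pyRange 1 (((clouds.length / Nat.gcd j.natAbs clouds.length : Nat) : Int) + 1) 1).map (costK clouds j)).sum := by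
    unfold cloudCounter_alt
    simp only [hgl, PySem.Int.floordiv_natCast]
    rw [sum_costK clouds j]
    have hlen : (PySem.List.pyRange 1 (((clouds.length / Nat.gcd j.natAbs clouds.length : Nat) : Int) + 1) 1).length
        = clouds.length / Nat.gcd j.natAbs clouds.length := by
      rw [PySem.List.length_pyRange_one]; omega
    rw [hlen]
    ring
  rw [hA, hB]
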